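-- pv_equiv track=rewrite | github.com/Aayushi-singh7/Adobe-India-Hackathon-1A | main.py | classify_headings
-- ===== SOURCE A (Python) =====
-- def classify_headings(font_counts):
--     sorted_fonts = sorted(font_counts.items(), key=lambda x: (-x[0][0], -x[1]))
--     size_rank = {}
--     rank = 1
--     for (size, font), _ in sorted_fonts:
--         if size not in size_rank:
--             size_rank[size] = f"H{rank}" if rank <= 3 else None
--             rank += 1
--     return size_rank
-- ===== SOURCE B (Python) =====
-- def classify_headings(font_counts):
--     sizes = {size for (size, _font) in font_counts}
--     result = {}
--     for s in sorted(sizes, reverse=True):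
--         bigger = sum(1 for t in sizes if t > s)
--         result[s] = f"H{bigger + 1}" if bigger < 3 else None
--     return result
-- ===== Notes on version B (the rewrite author's own statement) =====
-- stated objective: alternative
-- what changed: B computes each distinct size's heading level by counting the distinct sizes strictly greater than it, instead of sorting the (size,font) items by (-size,-count) and threading a rank counter through a first-occurrence loop.
import Mathlib
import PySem

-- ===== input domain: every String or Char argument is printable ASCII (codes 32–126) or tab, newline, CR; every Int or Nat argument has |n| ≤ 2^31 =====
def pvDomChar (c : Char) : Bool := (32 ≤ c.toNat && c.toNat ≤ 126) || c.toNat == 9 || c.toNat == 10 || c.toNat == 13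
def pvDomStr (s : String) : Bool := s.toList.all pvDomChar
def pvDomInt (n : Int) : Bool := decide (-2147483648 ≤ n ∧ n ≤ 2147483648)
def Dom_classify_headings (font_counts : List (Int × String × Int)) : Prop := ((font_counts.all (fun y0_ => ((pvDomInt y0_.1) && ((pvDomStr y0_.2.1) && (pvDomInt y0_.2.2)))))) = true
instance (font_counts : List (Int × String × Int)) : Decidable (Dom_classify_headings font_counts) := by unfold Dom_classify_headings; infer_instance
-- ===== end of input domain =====

-- B ranks each distinct size by counting strictly larger distinct sizes instead of
-- sorting the (size,font) items and threading a rank counter (alternative decomposition, same cost).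


-- ===== PORT A =====
def classify_headings (font_counts : List (Int × String × Int)) : List (Int × Option String) :=
  let sorted_fonts := PySem.List.sorted2 font_counts (fun x => -x.1) (fun x => -x.2.2)
  let st := sorted_fonts.foldl
    (fun (st : PySem.Dict Int (Option String) × Int) x =>
      if st.1.contains x.1 then st
      else (st.1.insert x.1 (if st.2 ≤ 3 then some ("H" ++ PySem.Int.toStr st.2) else none),
            st.2 + 1))
    (PySem.Dict.empty, (1 : Int))
  st.1.items

-- ===== PORT B =====
def classify_headings_alt (font_counts : List (Int × String × Int)) : List (Int × Option String) :=
  let sizes : PySem.Set Int := PySem.Set.ofList (font_counts.map (fun x => x.1))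
  let res := (PySem.List.sorted sizes (fun x => x) true).foldl
    (fun (res : PySem.Dict Int (Option String)) s =>
      let bigger : Int := (sizes.countP (fun t => decide (s < t)) : Int)
      res.insert s (if bigger < 3 then some ("H" ++ PySem.Int.toStr (bigger + 1)) else none))
    PySem.Dict.empty
  res.items

-- ===== PRECONDITION & SPEC =====
def Spec_classify_headings (font_counts : List (Int × String × Int)) (out : List (Int × Option String)) : Prop := out = classify_headings_alt font_counts
instance (font_counts : List (Int × String × Int)) (out : List (Int × Option String)) : Decidable (Spec_classify_headings font_counts out) := by unfold Spec_classify_headings; infer_instance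

-- ===== CLAIM (what is proved, stated in full; the proofs are below) =====
def Claim_equal_classify_headings : Prop := ∀ (font_counts : List (Int × String × Int)), Dom_classify_headings font_counts → Spec_classify_headings font_counts (classify_headings font_counts)

-- ===== LEMMAS AND PROOFS =====

-- proof-only helpers: first occurrences of L not in `seen`, and the labelled output list
def pvFirsts (seen : List Int) (L : List Int) : List Int :=
  match L with
  | [] => []
  | s :: t => if s ∈ seen then pvFirsts seen t else s :: pvFirsts (s :: seen) t

def pvLabelled (r : Int) (ks : List Int) : List (Int × Option String) :=
  match ks with
  | [] => []
  | s :: t => (s, if r ≤ 3 then some ("H" ++ PySem.Int.toStr r) else none) :: pvLabelled (r + 1) t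

theorem pv_firsts_congr (s1 s2 : List Int) (L : List Int) (h : ∀ a, a ∈ s1 ↔ a ∈ s2) :
    pvFirsts s1 L = pvFirsts s2 L := by
  induction L generalizing s1 s2 with
  | nil => rfl
  | cons s t ih =>
    by_cases hs : s ∈ s1
    · rw [pvFirsts, pvFirsts, if_pos hs, if_pos ((h s).1 hs)]
      exact ih s1 s2 h
    · rw [pvFirsts, pvFirsts, if_neg hs, if_neg (fun hm => hs ((h s).2 hm))]
      refine congrArg _ (ih (s :: s1) (s :: s2) ?_)
      intro a; simp [h a]

-- R-pairwise preservation through insertion sort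
theorem pv_insertBy_pairwise {α : Type} (before : α → α → Bool)
    (hasym : ∀ a b, before a b = true → before b a = false)
    (htrans : ∀ a b c, before a b = true → before b c = true → before a c = true)
    (x : α) (l : List α) (hl : l.Pairwise (fun a b => before b a = false)) :
    (PySem.List.insertBy before x l).Pairwise (fun a b => before b a = false) := by
  induction l with
  | nil => simp [PySem.List.insertBy]
  | cons y ys ih =>
    obtain ⟨hy, hys⟩ := List.pairwise_cons.mp hl
    by_cases h : before x y = true
    · simp only [PySem.List.insertBy, h, if_pos]
      refine List.Pairwise.cons ?_ (List.Pairwise.cons hy hys)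
      intro z hz
      rcases List.mem_cons.mp hz with rfl | hz
      · exact hasym _ _ h
      · by_contra hb
        have hzx : before z x = true := by
          cases hzx : before z x with
          | true => rfl
          | false => exact absurd hzx hb
        have := htrans _ _ _ hzx h
        have := hy z hz
        simp_all
    · have h' : before x y = false := by
        cases h2 : before x y with
        | true => exact absurd h2 h
        | false => rfl
      simp only [PySem.List.insertBy, h', Bool.false_eq_true, ite_false]
      refine List.Pairwise.cons ?_ (ih hys)
      intro z hz
      rcases (PySem.List.mem_insertBy before x z ys).1 hz with rfl | hz
      · exact h'
      · exact hy z hz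

theorem pv_foldl_insertBy_pairwise {α : Type} (before : α → α → Bool)
    (hasym : ∀ a b, before a b = true → before b a = false)
    (htrans : ∀ a b c, before a b = true → before b c = true → before a c = true)
    (xs : List α) (acc : List α) (hacc : acc.Pairwise (fun a b => before b a = false)) :
    (xs.foldl (fun acc x => PySem.List.insertBy before x acc) acc).Pairwise
      (fun a b => before b a = false) := by
  induction xs generalizing acc with
  | nil => exact hacc
  | cons x t ih => exact ih _ (pv_insertBy_pairwise before hasym htrans x acc hacc)

-- the sorted2 call in A is weakly descending in the first component
theorem pv_sortedFonts_pairwise (fc : List (Int × String × Int)) :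
    (PySem.List.sorted2 fc (fun x => -x.1) (fun x => -x.2.2)).Pairwise
      (fun a b => b.1 ≤ a.1) := by
  have before : (Int × String × Int) → (Int × String × Int) → Bool := fun a b =>
    decide (-a.1 < -b.1) || (!decide (-b.1 < -a.1) && decide (-a.2.2 < -b.2.2))
  have h : (PySem.List.sorted2 fc (fun x => -x.1) (fun x => -x.2.2)).Pairwise
      (fun a b => (decide (-b.1 < -a.1) || (!decide (-a.1 < -b.1) && decide (-b.2.2 < -a.2.2))) = false) := by
    rw [show PySem.List.sorted2 fc (fun x => -x.1) (fun x => -x.2.2) =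
      fc.foldl (fun acc x => PySem.List.insertBy
        (fun a b => decide (-a.1 < -b.1) || (!decide (-b.1 < -a.1) && decide (-a.2.2 < -b.2.2))) x acc) [] from rfl]
    refine pv_foldl_insertBy_pairwise
      (fun a b => decide (-a.1 < -b.1) || (!decide (-b.1 < -a.1) && decide (-a.2.2 < -b.2.2)))
      ?_ ?_ fc [] List.Pairwise.nil
    · intro a b hab
      simp only [Bool.or_eq_true, Bool.and_eq_true, Bool.not_eq_true', decide_eq_true_iff,
        decide_eq_false_iff_not, Bool.or_eq_false_iff, Bool.and_eq_false_iff,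
        Bool.not_eq_false'] at hab ⊢
      omega
    · intro a b c hab hbc
      simp only [Bool.or_eq_true, Bool.and_eq_true, Bool.not_eq_true', decide_eq_true_iff,
        decide_eq_false_iff_not] at hab hbc ⊢
      omega
  refine h.imp ?_
  intro a b hab
  simp only [Bool.or_eq_false_iff, Bool.and_eq_false_iff, decide_eq_false_iff_not,
    Bool.not_eq_false'] at hab
  omega

-- A's fold is `pvLabelled` of `pvFirsts` of the key trace
theorem pv_foldA (ys : List (Int × String × Int)) (d : PySem.Dict Int (Option String)) (r : Int)
    (hn : d.keys.Nodup) (hr : r = (d.items.length : Int) + 1) :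
    (ys.foldl
      (fun (st : PySem.Dict Int (Option String) × Int) x =>
        if st.1.contains x.1 then st
        else (st.1.insert x.1 (if st.2 ≤ 3 then some ("H" ++ PySem.Int.toStr st.2) else none),
              st.2 + 1))
      (d, r)).1.items = d.items ++ pvLabelled r (pvFirsts d.keys (ys.map (fun x => x.1))) := by
  induction ys generalizing d r with
  | nil => simp [pvFirsts, pvLabelled]
  | cons x t ih =>
    simp only [List.foldl_cons, List.map_cons]
    by_cases h : d.contains x.1
    · have hk : x.1 ∈ d.keys := (PySem.Dict.contains_iff_mem_keys d x.1).1 h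
      simp only [h, if_true, pvFirsts, if_pos hk]
      exact ih d r hn hr
    · have hc : d.contains x.1 = false := by simp [h]
      have hk : x.1 ∉ d.keys := fun hm => h ((PySem.Dict.contains_iff_mem_keys d x.1).2 hm)
      simp only [hc, Bool.false_eq_true, if_false, pvFirsts, if_neg hk]
      rw [ih (d.insert x.1 (if r ≤ 3 then some ("H" ++ PySem.Int.toStr r) else none)) (r + 1)
        (PySem.Dict.nodup_keys_insert d _ _ hn) ?_]
      · rw [PySem.Dict.items_insert_of_not_contains d _ hc,
          PySem.Dict.keys_insert_of_not_contains d _ hc,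
          pv_firsts_congr (d.keys ++ [x.1]) (x.1 :: d.keys) _ (by intro a; simp; tauto)]
        simp [pvLabelled, List.append_assoc]
      · rw [PySem.Dict.items_insert_of_not_contains d _ hc]
        simp only [List.length_append, List.length_cons, List.length_nil]
        omega

theorem pv_firsts_sublist (seen L : List Int) : (pvFirsts seen L).Sublist L := by
  induction L generalizing seen with
  | nil => simp [pvFirsts]
  | cons s t ih =>
    by_cases h : s ∈ seen
    · simp only [pvFirsts, if_pos h]
      exact (ih seen).cons s
    · simp only [pvFirsts, if_neg h]
      exact (ih (s :: seen)).cons₂ s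

theorem pv_mem_firsts (seen L : List Int) (a : Int) :
    a ∈ pvFirsts seen L ↔ a ∈ L ∧ a ∉ seen := by
  induction L generalizing seen with
  | nil => simp [pvFirsts]
  | cons s t ih =>
    by_cases h : s ∈ seen
    · simp only [pvFirsts, if_pos h, ih, List.mem_cons]
      constructor
      · rintro ⟨h1, h2⟩; exact ⟨Or.inr h1, h2⟩
      · rintro ⟨h1 | h1, h2⟩
        · exact absurd (h1 ▸ h) h2
        · exact ⟨h1, h2⟩
    · simp only [pvFirsts, if_neg h, List.mem_cons, ih, List.mem_cons]
      by_cases ha : a = s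
      · subst ha; simp [h]
      · simp [ha]

theorem pv_firsts_nodup (seen L : List Int) : (pvFirsts seen L).Nodup := by
  induction L generalizing seen with
  | nil => simp [pvFirsts]
  | cons s t ih =>
    by_cases h : s ∈ seen
    · simpa only [pvFirsts, if_pos h] using ih seen
    · simp only [pvFirsts, if_neg h, List.nodup_cons]
      refine ⟨fun hm => ?_, ih (s :: seen)⟩
      exact ((pv_mem_firsts (s :: seen) t s).1 hm).2 (List.mem_cons_self)

theorem pv_cnt_eq_idx (F : List Int) (hF : F.Pairwise (fun a b => b < a))
    (i : Nat) (h : i < F.length) :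
    F.countP (fun t => decide (F[i] < t)) = i := by
  have hsplit : F = F.take i ++ F.drop i := (List.take_append_drop i F).symm
  have hlen : (F.take i).length = i := by simp; omega
  have hge := List.pairwise_iff_getElem.mp hF
  have h1 : (F.take i).countP (fun t => decide (F[i] < t)) = i := by
    rw [List.countP_eq_length.mpr, hlen]
    intro a ha
    obtain ⟨j, hj, rfl⟩ := List.mem_iff_getElem.mp ha
    rw [List.getElem_take]
    simp only [decide_eq_true_iff]
    exact hge j i (by simp at hj; omega) h (by simp at hj; omega)
  have h2 : (F.drop i).countP (fun t => decide (F[i] < t)) = 0 := by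
    rw [List.countP_eq_zero.mpr]
    intro a ha
    obtain ⟨j, hj, rfl⟩ := List.mem_iff_getElem.mp ha
    rw [List.getElem_drop]
    simp only [decide_eq_true_iff, not_lt]
    rcases Nat.eq_zero_or_pos j with rfl | hj0
    · simp
    · exact le_of_lt (hge i (i + j) h (by simp at hj; omega) (by omega))
  have key : F.countP (fun t => decide (F[i] < t)) =
      (F.take i).countP (fun t => decide (F[i] < t)) +
      (F.drop i).countP (fun t => decide (F[i] < t)) := by
    generalize F[i] = v at *
    rw [← List.countP_append, List.take_append_drop]
  omega

theorem pv_labelled_length (F : List Int) (r : Int) : (pvLabelled r F).length = F.length := by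
  induction F generalizing r with
  | nil => rfl
  | cons s t ih => simp [pvLabelled, ih]

theorem pv_labelled_getElem (F : List Int) (r : Int) (i : Nat) (h : i < F.length) :
    (pvLabelled r F)[i]'(by rw [pv_labelled_length]; exact h) =
      (F[i], if r + (i : Int) ≤ 3 then some ("H" ++ PySem.Int.toStr (r + i)) else none) := by
  induction F generalizing r i with
  | nil => simp at h
  | cons s t ih =>
    cases i with
    | zero => simp [pvLabelled]
    | succ j =>
      have hj : j < t.length := by simpa using h
      have := ih (r + 1) j hj
      simp only [pvLabelled, List.getElem_cons_succ, this]
      have harith : r + 1 + (j : Int) = r + ((j : Nat) + 1 : Nat) := by push_cast; ring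
      rw [harith]


-- ===== VERDICT (by name: the statement is the Claim_ definition above) =====
theorem classify_headings_spec : Claim_equal_classify_headings := by
  intro fc _
  unfold Spec_classify_headings
  have hA : classify_headings fc = pvLabelled 1 (pvFirsts []
      ((PySem.List.sorted2 fc (fun x => -x.1) (fun x => -x.2.2)).map (fun x => x.1))) := by
    unfold classify_headings
    rw [pv_foldA _ PySem.Dict.empty 1 (by simp [PySem.Dict.keys_empty]) (by simp [PySem.Dict.empty])]
    simp [PySem.Dict.empty]
  have hsizes_nodup : (PySem.Set.ofList (fc.map (fun x => x.1))).Nodup :=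
    PySem.Set.nodup_ofList _
  have hsrt_nodup : (PySem.List.sorted (PySem.Set.ofList (fc.map (fun x => x.1))) (fun x => x) true).Nodup :=
    ((PySem.List.sorted_perm _ _ _).nodup_iff).mpr hsizes_nodup
  have hB : classify_headings_alt fc =
      (PySem.List.sorted (PySem.Set.ofList (fc.map (fun x => x.1))) (fun x => x) true).map
        (fun s => (s,
          if (((PySem.Set.ofList (fc.map (fun x => x.1))).countP (fun t => decide (s < t)) : Int)) < 3
          then some ("H" ++ PySem.Int.toStr
            (((PySem.Set.ofList (fc.map (fun x => x.1))).countP (fun t => decide (s < t)) : Int) + 1))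
          else none)) := by
    unfold classify_headings_alt
    rw [PySem.Dict.items_foldl_insert_fresh _ (fun s => s)
      (fun s => if (((PySem.Set.ofList (fc.map (fun x => x.1))).countP (fun t => decide (s < t)) : Int)) < 3
        then some ("H" ++ PySem.Int.toStr
          (((PySem.Set.ofList (fc.map (fun x => x.1))).countP (fun t => decide (s < t)) : Int) + 1))
        else none)
      PySem.Dict.empty (by intro a _; simp [PySem.Dict.contains_empty]) (by simpa using hsrt_nodup)]
    simp [PySem.Dict.empty]
  set L := (PySem.List.sorted2 fc (fun x => -x.1) (fun x => -x.2.2)).map (fun x => x.1) with hL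
  set F := pvFirsts [] L with hF
  have hFnd : F.Nodup := pv_firsts_nodup [] L
  have hPair : L.Pairwise (fun a b => b ≤ a) :=
    List.pairwise_map.mpr (pv_sortedFonts_pairwise fc)
  have hFle : F.Pairwise (fun a b => b ≤ a) := hPair.sublist (pv_firsts_sublist [] L)
  have hFgt : F.Pairwise (fun a b => b < a) := by
    have hne : F.Pairwise (fun a b => a ≠ b) := hFnd
    exact (hFle.and hne).imp (fun h => lt_of_le_of_ne h.1 (fun heq => h.2 heq.symm))
  have hperm : F.Perm (PySem.Set.ofList (fc.map (fun x => x.1))) := by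
    refine (List.perm_ext_iff_of_nodup hFnd hsizes_nodup).mpr ?_
    intro a
    rw [PySem.Set.mem_ofList, hF, pv_mem_firsts]
    have hmem : a ∈ L ↔ a ∈ fc.map (fun x => x.1) := by
      rw [hL]
      exact ((PySem.List.sorted2_perm fc (fun x => -x.1) (fun x => -x.2.2) false).map
        (fun x => x.1)).mem_iff
    simp [hmem]
  have hsorted : PySem.List.sorted (PySem.Set.ofList (fc.map (fun x => x.1))) (fun x => x) true = F :=
    PySem.List.sorted_rev_eq_of_perm_of_pairwise_gt _ F (fun x => x) hperm hFgt
  rw [hA, hB, hsorted]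
  apply List.ext_getElem
  · simp [pv_labelled_length]
  · intro i h1 h2
    have hi : i < F.length := by simpa using h2
    rw [List.getElem_map, pv_labelled_getElem F 1 i hi]
    have hcnt : ((PySem.Set.ofList (fc.map (fun x => x.1))).countP (fun t => decide (F[i] < t)) : Int)
        = (i : Int) := by
      rw [← hperm.countP_eq, pv_cnt_eq_idx F hFgt i hi]
    simp only [hcnt]
    have h13 : (1 : Int) + (i : Int) = (i : Int) + 1 := by ring
    rw [h13, if_congr (by omega : ((i : Int) + 1 ≤ 3) ↔ ((i : Int) < 3)) rfl rfl]
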